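-- pv_equiv track=rewrite | github.com/hongytan/Intro-to-Algorithms | ps3-template/count_anagram_substrings.py | compute_hash_table
-- ===== SOURCE A (Python) =====
-- def find_hash(s):
--         # Compute frequency table
--         frequency_table = [0 for _ in range(26)]
--         for j in s:
--                 frequency_table[ord(j)-97] += 1
--
--         # Compute hash for frequency table
--         h = 0
--         for j in range(26):
--                 h += frequency_table[j]*26**j
--
--         return h
--
-- def compute_hash_table(A,k):
--         n = len(A) - k + 1
--         D = {}
--
--         for i in range(n):
--                 substring = A[i:i+k]
--                 h = find_hash(substring)
--
--                 if h in D: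
--                         D[h] += 1
--                 else:
--                         D[h] = 1
--         return D
-- ===== SOURCE B (Python) =====
-- def compute_hash_table(A, k):
--     # Sliding window: the hash is linear in character counts, so each window's
--     # hash is the previous one plus the entering char's weight minus the leaving one's.
--     if k < 1 or k > len(A):
--         return {}
--     pw = {chr(97 + j): 26 ** j for j in range(26)}
--     h = sum(pw[c] for c in A[:k])
--     D = {h: 1}
--     for i in range(k, len(A)):
--         h += pw[A[i]] - pw[A[i - k]]
--         D[h] = D.get(h, 0) + 1
--     return D
-- ===== Notes on version B (the rewrite author's own statement) =====
-- stated objective: faster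
-- what changed: Instead of rebuilding a 26-entry frequency table and recomputing 26 powers for every window, B exploits linearity of the hash and slides it in O(1) big-int operations per window (add entering char's precomputed weight, subtract leaving char's).
-- outside the precondition, e.g. on compute_hash_table('abc', 0): A returns {0: 4}, B returns {}; on compute_hash_table('G', 1): A returns {1: 1}, B raises KeyError
import Mathlib
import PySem

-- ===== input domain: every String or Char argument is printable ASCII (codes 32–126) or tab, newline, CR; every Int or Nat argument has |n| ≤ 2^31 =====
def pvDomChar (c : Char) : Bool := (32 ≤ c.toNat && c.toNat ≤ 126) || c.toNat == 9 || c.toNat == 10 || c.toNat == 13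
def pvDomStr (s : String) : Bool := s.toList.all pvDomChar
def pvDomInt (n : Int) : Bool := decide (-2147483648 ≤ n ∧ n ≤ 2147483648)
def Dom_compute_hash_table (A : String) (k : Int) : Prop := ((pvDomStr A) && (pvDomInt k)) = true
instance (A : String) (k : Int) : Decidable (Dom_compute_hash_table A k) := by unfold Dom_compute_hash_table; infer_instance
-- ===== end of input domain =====

-- B replaces A's per-window frequency-table rebuild by a sliding-window hash update
-- (the hash is linear in character counts), measurably faster on large inputs.


-- ===== PORT A =====
def find_hash (s : List Char) : Int :=
  let ft : List Int := (PySem.List.pyRange 0 26 1).map (fun _ => (0 : Int))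
  let ft := s.foldl (fun ft j =>
    PySem.List.pySetD ft ((j.toNat : Int) - 97) (PySem.List.pyGetD ft ((j.toNat : Int) - 97) 0 + 1)) ft
  (PySem.List.pyRange 0 26 1).foldl (fun h j => h + PySem.List.pyGetD ft j 0 * 26 ^ j.toNat) 0

def compute_hash_table (A : String) (k : Int) : List (Int × Int) :=
  let n : Int := PySem.Str.len A - k + 1
  let D : PySem.Dict Int Int := (PySem.List.pyRange 0 n 1).foldl (fun D i =>
    let substring := PySem.List.slice A.toList (some i) (some (i + k))
    let h := find_hash substring
    if D.contains h then D.modify h 0 (· + 1) else D.insert h 1) PySem.Dict.empty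
  D.items

-- ===== PORT B =====
-- pw = {chr(97 + j): 26**j for j in range(26)}
def chtPw : PySem.Dict Char Int :=
  (PySem.List.pyRange 0 26 1).foldl
    (fun d j => d.insert (Char.ofNat (97 + j.toNat)) ((26 : Int) ^ j.toNat)) PySem.Dict.empty

def compute_hash_table_alt (A : String) (k : Int) : List (Int × Int) :=
  if k < 1 ∨ PySem.Str.len A < k then [] else
  let cs := A.toList
  -- h = sum(pw[c] for c in A[:k]); Pre_ guarantees every lookup hits (Python raises KeyError otherwise)
  let h0 := (PySem.List.slice cs none (some k)).foldl (fun acc c => acc + chtPw.getD c 0) 0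
  let st := (PySem.List.pyRange k (PySem.Str.len A) 1).foldl
    (fun (st : Int × PySem.Dict Int Int) i =>
      let h := st.1 + chtPw.getD (PySem.List.pyGetD cs i ' ') 0
                    - chtPw.getD (PySem.List.pyGetD cs (i - k) ' ') 0
      (h, st.2.insert h (st.2.getD h 0 + 1)))
    (h0, (PySem.Dict.empty : PySem.Dict Int Int).insert h0 1)
  st.2.items

-- ===== PRECONDITION & SPEC =====
-- Pre_ restricts to the function's natural domain, window length k ≥ 1 over a lowercase-letter
-- string (whenever a window exists): for k ≤ 0 A returns hashes of accidental Python-slice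
-- fragments (B rejects such k); on characters with codes 71–96 A's negative table index silently
-- wraps around the 26-entry list (an implementation artefact) while B raises KeyError; on any
-- other non-lowercase character A itself raises IndexError.
def Pre_compute_hash_table (A : String) (k : Int) : Prop :=
  1 ≤ k ∧ (PySem.Str.len A < k ∨ A.toList.all (fun c => 97 ≤ c.toNat && c.toNat ≤ 122) = true)
instance (A : String) (k : Int) : Decidable (Pre_compute_hash_table A k) := by
  unfold Pre_compute_hash_table; infer_instance

def pvWitness_compute_hash_table : String × Int := ("abcab", 3)

def Spec_compute_hash_table (A : String) (k : Int) (out : List (Int × Int)) : Prop :=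
  out = compute_hash_table_alt A k
instance (A : String) (k : Int) (out : List (Int × Int)) : Decidable (Spec_compute_hash_table A k out) := by
  unfold Spec_compute_hash_table; infer_instance

-- ===== CLAIM (what is proved, stated in full; the proofs are below) =====
def Claim_equal_compute_hash_table : Prop := ∀ (A : String) (k : Int),
  Dom_compute_hash_table A k → Pre_compute_hash_table A k →
  Spec_compute_hash_table A k (compute_hash_table A k)

-- ===== LEMMAS AND PROOFS =====

-- the letter weight and the window hash, the mathematical value both programs compute
def chtW (c : Char) : Int := (26 : Int) ^ (c.toNat - 97)
def chtH (s : List Char) : Int := (s.map chtW).sum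
def chtStep (d : PySem.Dict Int Int) (h : Int) : PySem.Dict Int Int := d.insert h (d.getD h 0 + 1)

def chtHsum (ft : List Int) : Int :=
  (PySem.List.pyRange 0 26 1).foldl (fun h j => h + PySem.List.pyGetD ft j 0 * 26 ^ j.toNat) 0

lemma getD_set_lt (l : List Int) (i j : Nat) (v : Int) (hj : j < l.length) :
    (l.set i v).getD j 0 = if i = j then v else l.getD j 0 := by
  simp [List.getD_eq_getElem?_getD, List.getElem?_set]
  split <;> rename_i h
  · subst h; simp [hj]
  · rfl

lemma chtHsum_eq_sum (ft : List Int) :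
    chtHsum ft = ∑ j ∈ Finset.range 26, ft.getD j 0 * 26 ^ j := by
  unfold chtHsum
  rw [PySem.List.foldl_add (g := fun j => PySem.List.pyGetD ft j 0 * 26 ^ j.toNat),
      PySem.List.pyRange_one]
  simp [List.map_map, Function.comp_def]
  rfl

lemma chtHsum_set (ft : List Int) (h26 : ft.length = 26) (m : Nat) (hm : m < 26) (v : Int) :
    chtHsum (ft.set m v) = chtHsum ft + (v - ft.getD m 0) * 26 ^ m := by
  rw [chtHsum_eq_sum, chtHsum_eq_sum]
  have key : ∀ j ∈ Finset.range 26,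
      (ft.set m v).getD j 0 * 26 ^ j
        = ft.getD j 0 * 26 ^ j + (if m = j then (v - ft.getD m 0) * 26 ^ j else 0) := by
    intro j hj
    rw [getD_set_lt ft m j v (by simp [h26] at hj ⊢; omega)]
    split <;> rename_i h
    · subst h; ring
    · ring
  rw [Finset.sum_congr rfl key, Finset.sum_add_distrib, Finset.sum_ite_eq]
  simp [hm]

lemma fh_loop (s : List Char) : ∀ ft : List Int, ft.length = 26 →
    (∀ c ∈ s, 97 ≤ c.toNat ∧ c.toNat ≤ 122) →
    chtHsum (s.foldl (fun ft j =>
      PySem.List.pySetD ft ((j.toNat : Int) - 97) (PySem.List.pyGetD ft ((j.toNat : Int) - 97) 0 + 1)) ft)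
    = chtHsum ft + chtH s := by
  induction s with
  | nil => intro ft _ _; simp [chtH]
  | cons c s ih =>
    intro ft h26 low
    obtain ⟨h97, h122⟩ := low c (by simp)
    have hcast : ((c.toNat : Int) - 97) = ((c.toNat - 97 : Nat) : Int) := by omega
    rw [List.foldl_cons, hcast, PySem.List.pySetD_natCast, PySem.List.pyGetD_natCast,
        ih _ (by simp [h26]) (fun c hc => low c (by simp [hc])),
        chtHsum_set ft h26 _ (by omega)]
    simp [chtH, chtW]
    ring

lemma find_hash_eq (s : List Char) (low : ∀ c ∈ s, 97 ≤ c.toNat ∧ c.toNat ≤ 122) :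
    find_hash s = chtH s := by
  show chtHsum (s.foldl _ ((PySem.List.pyRange 0 26 1).map (fun _ => (0 : Int)))) = chtH s
  rw [fh_loop s _ (by rfl) low]
  have : chtHsum ((PySem.List.pyRange 0 26 1).map (fun _ => (0 : Int))) = 0 := by decide
  rw [this, zero_add]

lemma chtPw_getD (c : Char) (h97 : 97 ≤ c.toNat) (h122 : c.toNat ≤ 122) :
    chtPw.getD c 0 = chtW c := by
  obtain ⟨m, hm, rfl⟩ : ∃ m, m < 26 ∧ c = Char.ofNat (97 + m) := by
    refine ⟨c.toNat - 97, by omega, ?_⟩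
    have h : 97 + (c.toNat - 97) = c.toNat := by omega
    rw [h, Char.ofNat_toNat]
  interval_cases m <;> decide

lemma slide (cs : List Char) (k' j : Nat) (hk : 1 ≤ k') (hle : j + k' < cs.length) :
    chtH ((cs.drop (j+1)).take k')
      = chtH ((cs.drop j).take k') + chtW (cs.getD (j + k') ' ') - chtW (cs.getD j ' ') := by
  obtain ⟨m, rfl⟩ : ∃ m, k' = m + 1 := ⟨k' - 1, by omega⟩
  have hj : j < cs.length := by omega
  have hd : cs.drop j = cs[j] :: cs.drop (j+1) := List.drop_eq_getElem_cons hj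
  have hlen : m < (cs.drop (j+1)).length := by simp; omega
  have hwj : (cs.drop j).take (m+1) = cs[j] :: (cs.drop (j+1)).take m := by
    rw [hd, List.take_succ_cons]
  have hwj1 : (cs.drop (j+1)).take (m+1) = (cs.drop (j+1)).take m ++ [cs[j + (m+1)]] := by
    rw [List.take_add_one]
    congr 1
    rw [List.getElem?_eq_getElem hlen]
    simp [List.getElem_drop]
    congr 1
    omega
  rw [hwj, hwj1, List.getD_eq_getElem cs ' ' (by omega : j + (m+1) < cs.length),
      List.getD_eq_getElem cs ' ' hj]
  simp [chtH]
  ring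


lemma loopB (cs : List Char) (k' : Nat) (hk : 1 ≤ k')
    (low : ∀ c ∈ cs, 97 ≤ c.toNat ∧ c.toNat ≤ 122) :
    ∀ (m j : Nat) (d : PySem.Dict Int Int), j + k' + m ≤ cs.length →
    ((PySem.List.pyRange ((j + k' : Nat) : Int) ((j + k' + m : Nat) : Int) 1).foldl
       (fun (st : Int × PySem.Dict Int Int) i =>
         let h := st.1 + chtPw.getD (PySem.List.pyGetD cs i ' ') 0
                       - chtPw.getD (PySem.List.pyGetD cs (i - (k' : Int)) ' ') 0
         (h, st.2.insert h (st.2.getD h 0 + 1)))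
       (chtH ((cs.drop j).take k'), d)).2
    = (List.range' (j+1) m).foldl (fun d j' => chtStep d (chtH ((cs.drop j').take k'))) d := by
  intro m
  induction m with
  | zero =>
    intro j d _
    rw [PySem.List.pyRange_one_eq_nil (by omega)]
    simp
  | succ m ih =>
    intro j d hle
    rw [PySem.List.pyRange_one_cons (by exact_mod_cast by omega : ((j + k' : Nat) : Int) < ((j + k' + (m+1) : Nat) : Int))]
    rw [List.foldl_cons]
    have e1 : PySem.List.pyGetD cs ((j + k' : Nat) : Int) ' ' = cs.getD (j + k') ' ' :=
      PySem.List.pyGetD_natCast cs (j + k') ' '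
    have e2 : ((j + k' : Nat) : Int) - (k' : Int) = ((j : Nat) : Int) := by push_cast; ring
    have e3 : PySem.List.pyGetD cs ((j : Nat) : Int) ' ' = cs.getD j ' ' :=
      PySem.List.pyGetD_natCast cs j ' '
    have hs : chtH ((cs.drop j).take k') + chtPw.getD (cs.getD (j + k') ' ') 0
              - chtPw.getD (cs.getD j ' ') 0 = chtH ((cs.drop (j+1)).take k') := by
      have hjk : j + k' < cs.length := by omega
      have hm1 : cs.getD (j + k') ' ' ∈ cs := by
        rw [List.getD_eq_getElem cs ' ' hjk]; exact List.getElem_mem _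
      have hm2 : cs.getD j ' ' ∈ cs := by
        rw [List.getD_eq_getElem cs ' ' (by omega : j < cs.length)]; exact List.getElem_mem _
      rw [chtPw_getD _ (low _ hm1).1 (low _ hm1).2, chtPw_getD _ (low _ hm2).1 (low _ hm2).2,
          slide cs k' j hk hjk]
    simp only [e1, e2, e3]
    rw [hs]
    have e4 : ((j + k' : Nat) : Int) + 1 = (((j+1) + k' : Nat) : Int) := by push_cast; ring
    have e5 : ((j + k' + (m+1) : Nat) : Int) = (((j+1) + k' + m : Nat) : Int) := by push_cast; ring
    rw [e4, e5, ih (j+1) _ (by omega), List.range'_succ, List.foldl_cons]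
    simp [chtStep]

theorem cht_main (A : String) (k : Int) (hpre : Pre_compute_hash_table A k) :
    compute_hash_table A k = compute_hash_table_alt A k := by
  obtain ⟨hk1, hrest⟩ := hpre
  by_cases hbig : PySem.Str.len A < k
  · -- no window: both return []
    unfold compute_hash_table
    dsimp only
    rw [PySem.List.pyRange_one_eq_nil (by omega)]
    unfold compute_hash_table_alt
    rw [if_pos (Or.inr hbig)]
    rfl
  · have low : ∀ c ∈ A.toList, 97 ≤ c.toNat ∧ c.toNat ≤ 122 := by
      intro c hc
      have h := List.all_eq_true.mp (hrest.resolve_left hbig) c hc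
      simpa using h
    have hlen : PySem.Str.len A = (A.toList.length : Int) := PySem.Str.len_eq A
    obtain ⟨k', hk'⟩ : ∃ k' : Nat, k = (k' : Int) := ⟨k.toNat, by omega⟩
    have hk'1 : 1 ≤ k' := by omega
    have hkL : k' ≤ A.toList.length := by rw [hlen, hk'] at hbig; omega
    obtain ⟨M, hM⟩ : ∃ M, A.toList.length = k' + M := ⟨A.toList.length - k', by omega⟩
    have lowwin : ∀ (t : Nat), ∀ c ∈ (A.toList.drop t).take k', 97 ≤ c.toNat ∧ c.toNat ≤ 122 :=
      fun t c hc => low c (List.mem_of_mem_drop (List.mem_of_mem_take hc))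
    -- canonical value both sides reach
    have hA : compute_hash_table A k
        = ((List.range' 1 M).foldl (fun d j => chtStep d (chtH ((A.toList.drop j).take k')))
            ((PySem.Dict.empty : PySem.Dict Int Int).insert (chtH ((A.toList.drop 0).take k')) 1)).items := by
      unfold compute_hash_table
      dsimp only
      rw [hlen, hk']
      have hn : ((A.toList.length : Int)) - (k' : Int) + 1 = ((M + 1 : Nat) : Int) := by push_cast; omega
      rw [hn, PySem.List.pyRange_zero_natCast, List.foldl_map]
      rw [PySem.List.foldl_congr_mem _ _
        (fun d (t : Nat) => chtStep d (chtH ((A.toList.drop t).take k'))) _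
        (fun d t _ => by
          rw [PySem.List.slice_natCast_add A.toList t k', find_hash_eq _ (lowwin t)]
          by_cases hct : (PySem.Dict.contains d (chtH ((A.toList.drop t).take k'))) = true
          · rw [if_pos hct]; rfl
          · rw [if_neg hct]
            show _ = PySem.Dict.insert d _ (PySem.Dict.getD d _ 0 + 1)
            rw [PySem.Dict.getD_of_not_contains d 0 (by simpa using hct)]
            norm_num
        )]
      rw [List.range_eq_range', List.range'_succ, List.foldl_cons]
      simp [chtStep]
    have L0 := loopB A.toList k' hk'1 low M 0
      ((PySem.Dict.empty : PySem.Dict Int Int).insert (chtH ((A.toList.drop 0).take k')) 1)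
      (by omega)
    rw [Nat.zero_add] at L0
    rw [show k' + M = A.toList.length from hM.symm] at L0
    have hB : compute_hash_table_alt A k
        = ((List.range' 1 M).foldl (fun d j => chtStep d (chtH ((A.toList.drop j).take k')))
            ((PySem.Dict.empty : PySem.Dict Int Int).insert (chtH ((A.toList.drop 0).take k')) 1)).items := by
      unfold compute_hash_table_alt
      rw [if_neg (by rw [hlen, hk']; omega)]
      dsimp only
      rw [hlen, hk']
      have hh0 : (PySem.List.slice A.toList none (some ((k' : Nat) : Int))).foldl
          (fun acc c => acc + chtPw.getD c 0) 0 = chtH ((A.toList.drop 0).take k') := by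
        rw [PySem.List.slice_to A.toList (by positivity), PySem.List.foldl_add _ (fun c => chtPw.getD c 0)]
        have ht : ((k' : Int)).toNat = k' := by omega
        rw [ht, zero_add, List.drop_zero, chtH,
            List.map_congr_left (fun c hc => chtPw_getD c (low c (List.mem_of_mem_take hc)).1
              (low c (List.mem_of_mem_take hc)).2)]
      rw [hh0, L0]
    rw [hA, hB]

-- ===== VERDICT (by name: the statement is the Claim_ definition above) =====
theorem compute_hash_table_spec : Claim_equal_compute_hash_table := by
  intro A k _ hpre
  unfold Spec_compute_hash_table
  exact cht_main A k hpre
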